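-- pv_equiv track=rewrite | github.com/vValkroVv/unlearning | src/tools/new_method_variant_utils.py | base_variant_algorithm
-- ===== SOURCE A (Python) =====
-- SPAN_VARIANT_FAMILIES = {
--     "span_cf": "SpanCF",
--     "span_cf_samnpo": "SpanCF-SAMNPO",
--     "span_cf_simnpo": "SpanCF-SimNPO",
--     "span_cf_local_retain": "SpanCF-LocalRetain",
--     "span_cf_simnpo_local_retain": "SpanCF-SimNPO-LocalRetain",
--     "span_cf_simnpo_sam": "SpanCF-SimNPO-SAM",
--     "span_cf_simnpo_projected": "SpanCF-SimNPO-Projected",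
-- }
--
-- def base_variant_algorithm(method_key: str) -> str | None:
--     for prefix in sorted(SPAN_VARIANT_FAMILIES, key=len, reverse=True):
--         if method_key == prefix or method_key.startswith(f"{prefix}_"):
--             return prefix
--     if method_key.startswith("multicf_"):
--         return "multicf"
--     if method_key.startswith("boundary_cf_"):
--         return "boundary_cf"
--     return None
-- ===== SOURCE B (Python) =====
-- SPAN_VARIANT_FAMILIES = {
--     "span_cf": "SpanCF",
--     "span_cf_samnpo": "SpanCF-SAMNPO",
--     "span_cf_simnpo": "SpanCF-SimNPO",
--     "span_cf_local_retain": "SpanCF-LocalRetain",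
--     "span_cf_simnpo_local_retain": "SpanCF-SimNPO-LocalRetain",
--     "span_cf_simnpo_sam": "SpanCF-SimNPO-SAM",
--     "span_cf_simnpo_projected": "SpanCF-SimNPO-Projected",
-- }
--
-- def base_variant_algorithm(method_key: str) -> str | None:
--     matches = [p for p in SPAN_VARIANT_FAMILIES
--                if method_key == p or method_key.startswith(p + "_")]
--     if matches:
--         return max(matches, key=len)
--     if method_key.startswith("multicf_"):
--         return "multicf"
--     if method_key.startswith("boundary_cf_"):
--         return "boundary_cf"
--     return None
-- ===== Notes on version B (the rewrite author's own statement) =====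
-- stated objective: alternative
-- what changed: Instead of sorting the family prefixes by length descending and returning the first match, B collects all matching prefixes in one unsorted pass and returns the longest match via max(key=len).
import Mathlib
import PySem

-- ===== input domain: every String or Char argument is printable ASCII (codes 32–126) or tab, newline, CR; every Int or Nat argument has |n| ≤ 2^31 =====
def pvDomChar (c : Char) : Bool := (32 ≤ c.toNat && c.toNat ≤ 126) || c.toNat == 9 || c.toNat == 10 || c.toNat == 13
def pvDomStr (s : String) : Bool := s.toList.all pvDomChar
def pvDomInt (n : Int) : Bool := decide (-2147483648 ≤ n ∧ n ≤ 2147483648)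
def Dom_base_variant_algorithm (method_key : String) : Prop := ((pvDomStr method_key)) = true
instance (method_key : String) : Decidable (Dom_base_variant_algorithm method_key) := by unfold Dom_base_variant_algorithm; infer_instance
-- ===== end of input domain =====

-- B replaces A's sort-by-length-then-first-match with build-all-matches-then-max(key=len); objective: alternative decomposition.

-- module-level dict SPAN_VARIANT_FAMILIES (insertion order)
def SPAN_VARIANT_FAMILIES : List (String × String) :=
  [("span_cf", "SpanCF"),
   ("span_cf_samnpo", "SpanCF-SAMNPO"),
   ("span_cf_simnpo", "SpanCF-SimNPO"),
   ("span_cf_local_retain", "SpanCF-LocalRetain"),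
   ("span_cf_simnpo_local_retain", "SpanCF-SimNPO-LocalRetain"),
   ("span_cf_simnpo_sam", "SpanCF-SimNPO-SAM"),
   ("span_cf_simnpo_projected", "SpanCF-SimNPO-Projected")]

-- ===== PORT A =====
def base_variant_algorithm (method_key : String) : Option String :=
  -- for prefix in sorted(SPAN_VARIANT_FAMILIES, key=len, reverse=True): if match: return prefix
  match (PySem.List.sorted (SPAN_VARIANT_FAMILIES.map Prod.fst)
           (fun p => PySem.Str.len p) true).find?
          (fun pfx => method_key == pfx
            || PySem.Str.startswith method_key (pfx ++ "_")) with
  | some pfx => some pfx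
  | none =>
    if PySem.Str.startswith method_key "multicf_" then some "multicf"
    else if PySem.Str.startswith method_key "boundary_cf_" then some "boundary_cf"
    else none

-- ===== PORT B =====
def base_variant_algorithm_alt (method_key : String) : Option String :=
  let matched := (SPAN_VARIANT_FAMILIES.map Prod.fst).filter
    (fun p => method_key == p || PySem.Str.startswith method_key (p ++ "_"))
  match PySem.List.max? matched (fun p => PySem.Str.len p) with
  | some p => some p
  | none =>
    if PySem.Str.startswith method_key "multicf_" then some "multicf"
    else if PySem.Str.startswith method_key "boundary_cf_" then some "boundary_cf"
    else none

-- ===== PRECONDITION & SPEC =====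
def Spec_base_variant_algorithm (method_key : String) (out : Option String) : Prop := out = base_variant_algorithm_alt method_key
instance (method_key : String) (out : Option String) : Decidable (Spec_base_variant_algorithm method_key out) := by unfold Spec_base_variant_algorithm; infer_instance

-- ===== CLAIM (what is proved, stated in full; the proofs are below) =====
def Claim_equal_base_variant_algorithm : Prop := ∀ (method_key : String), Dom_base_variant_algorithm method_key → Spec_base_variant_algorithm method_key (base_variant_algorithm method_key)

-- ===== LEMMAS AND PROOFS =====

-- Python's sorted is stable: the concrete length-descending order of the seven keys.
theorem sorted_keys_eq :
    PySem.List.sorted (SPAN_VARIANT_FAMILIES.map Prod.fst) (fun p => PySem.Str.len p) true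
    = ["span_cf_simnpo_local_retain", "span_cf_simnpo_projected",
       "span_cf_local_retain", "span_cf_simnpo_sam",
       "span_cf_samnpo", "span_cf_simnpo", "span_cf"] := by decide

-- First match in length-descending order = longest match (max, key=len) over insertion order,
-- for ANY predicate f on the seven keys (the two length-14 keys appear in the same relative
-- order on both sides, so ties agree).
set_option maxHeartbeats 1000000 in
theorem core (f : String → Bool) (g : Option String) :
    (match (["span_cf_simnpo_local_retain", "span_cf_simnpo_projected",
             "span_cf_local_retain", "span_cf_simnpo_sam",
             "span_cf_samnpo", "span_cf_simnpo", "span_cf"] : List String).find? f with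
     | some p => some p
     | none => g)
    = (match PySem.List.max? ((SPAN_VARIANT_FAMILIES.map Prod.fst).filter f)
               (fun p => PySem.Str.len p) with
       | some p => some p
       | none => g) := by
  cases h1 : f "span_cf" <;>
  cases h2 : f "span_cf_samnpo" <;>
  cases h3 : f "span_cf_simnpo" <;>
  cases h4 : f "span_cf_local_retain" <;>
  cases h5 : f "span_cf_simnpo_local_retain" <;>
  cases h6 : f "span_cf_simnpo_sam" <;>
  cases h7 : f "span_cf_simnpo_projected" <;>
    simp [SPAN_VARIANT_FAMILIES, List.find?, List.filter, h1, h2, h3, h4, h5, h6, h7] <;>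
    rfl

-- ===== VERDICT (by name: the statement is the Claim_ definition above) =====
theorem base_variant_algorithm_spec : Claim_equal_base_variant_algorithm := by
  intro k _
  unfold Spec_base_variant_algorithm base_variant_algorithm base_variant_algorithm_alt
  rw [sorted_keys_eq]
  exact core (fun p => k == p || PySem.Str.startswith k (p ++ "_")) _
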